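-- pv_equiv track=rewrite | github.com/kiranbahadurbam/Secure_Message_CLI | util.py | format_key
-- ===== SOURCE A (Python) =====
-- def format_key(key: str) -> str:
--     key_str = ''
--     count = 0
--
--     for i in str(key):
--         if count <= 3:
--             key_str += i
--             count += 1
--         else:
--             count = 0
--             key_str += ' '
--
--     return key_str.strip()
-- ===== SOURCE B (Python) =====
-- def format_key(key: str) -> str:
--     s = str(key)
--     parts = []
--     i = 0
--     while len(s) - i > 4:
--         parts.append(s[i:i+4] + ' ')
--         i += 5
--     parts.append(s[i:])
--     return ''.join(parts).strip()
-- ===== Notes on version B (the rewrite author's own statement) =====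
-- stated objective: simpler
-- what changed: Replaced A's per-character loop with a string-builder and a counter that resets every fifth character by a direct recursion over blocks of five characters (keep the first four, emit a space), followed by one strip.
import Mathlib
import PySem

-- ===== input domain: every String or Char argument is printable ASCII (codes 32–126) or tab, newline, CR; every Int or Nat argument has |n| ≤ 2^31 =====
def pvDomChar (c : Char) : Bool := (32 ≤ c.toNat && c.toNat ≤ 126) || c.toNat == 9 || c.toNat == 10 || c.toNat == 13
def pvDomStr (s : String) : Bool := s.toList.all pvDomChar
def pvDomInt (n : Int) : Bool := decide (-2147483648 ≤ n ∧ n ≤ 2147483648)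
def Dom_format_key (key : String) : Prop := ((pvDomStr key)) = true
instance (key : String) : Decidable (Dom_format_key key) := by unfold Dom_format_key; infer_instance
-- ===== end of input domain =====

-- B replaces A's stateful character-by-character counter loop with a single loop over
-- fixed blocks of five characters (keep four, emit one space); same result, plainer decomposition.

-- ===== PORT A =====
-- for i in str(key): if count <= 3: key_str += i; count += 1 else: count = 0; key_str += ' '
def format_key (key : String) : String :=
  let r := key.toList.foldl
    (fun (st : String × Int) i =>
      if st.2 ≤ 3 then (st.1.push i, st.2 + 1) else (st.1 ++ " ", (0 : Int)))
    ("", (0 : Int))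
  PySem.Str.strip r.1

-- ===== PORT B =====
-- while len(s) - i > 4: parts.append(s[i:i+4] + ' '); i += 5   — then parts.append(s[i:])
def loopB (s : List Char) (i : Nat) (parts : List (List Char)) : List (List Char) :=
  if s.length - i > 4 then
    loopB s (i + 5) (parts ++ [PySem.List.slice s (some (i : Int)) (some ((i : Int) + 4)) ++ [' ']])
  else
    parts ++ [PySem.List.slice s (some (i : Int)) none]
termination_by s.length - i
decreasing_by omega

-- return ''.join(parts).strip()
def format_key_alt (key : String) : String :=
  PySem.Str.strip (String.ofList (PySem.Chars.join [] (loopB key.toList 0 [])))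

-- ===== PRECONDITION & SPEC =====
def Spec_format_key (key : String) (out : String) : Prop := out = format_key_alt key
instance (key : String) (out : String) : Decidable (Spec_format_key key out) := by unfold Spec_format_key; infer_instance

-- ===== CLAIM (what is proved, stated in full; the proofs are below) =====
def Claim_equal_format_key : Prop := ∀ (key : String), Dom_format_key key → Spec_format_key key (format_key key)

-- ===== LEMMAS AND PROOFS =====

-- Proof-side normal form: the string both programs build before stripping.
def chunksB (t : List Char) : List Char :=
  if t.length ≤ 4 then t
  else t.take 4 ++ [' '] ++ chunksB (t.drop 5)
termination_by t.length
decreasing_by simp; omega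

-- joining with the empty separator is flattening
theorem join_nil_flatten (parts : List (List Char)) :
    PySem.Chars.join [] parts = parts.flatten := by
  induction parts with
  | nil => simp [PySem.Chars.join, List.intercalate]
  | cons h t ih =>
      cases t with
      | nil => simp [PySem.Chars.join, List.intercalate]
      | cons h2 t2 =>
        rw [PySem.Chars.join_cons_cons]
        simp only [List.flatten_cons]
        simpa [PySem.Chars.join] using ih

theorem slice_from_nat (s : List Char) (i : Nat) :
    PySem.List.slice s (some (i : Int)) none = s.drop i := by
  simp [PySem.List.slice_from]

theorem slice_block_nat (s : List Char) (i : Nat) :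
    PySem.List.slice s (some (i : Int)) (some ((i : Int) + 4)) = (s.drop i).take 4 := by
  have h := PySem.List.slice_natCast s i (i + 4)
  push_cast at h ⊢
  rw [h]
  simp [List.take_drop]

-- The loop of A, started with counter 0, appends exactly chunksB of the remaining input.
theorem loopA_eq_chunksB (n : Nat) : ∀ (l : List Char), l.length ≤ n → ∀ (acc : String),
    ((l.foldl
      (fun (st : String × Int) i =>
        if st.2 ≤ 3 then (st.1.push i, st.2 + 1) else (st.1 ++ " ", (0 : Int)))
      (acc, (0 : Int))).1).toList = acc.toList ++ chunksB l := by
  induction n with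
  | zero =>
    intro l hl acc
    have : l = [] := List.length_eq_zero_iff.mp (Nat.le_zero.mp hl)
    subst this
    simp [chunksB]
  | succ n ih =>
    intro l hl acc
    rcases l with _ | ⟨a, _ | ⟨b, _ | ⟨c, _ | ⟨d, _ | ⟨e, rest⟩⟩⟩⟩⟩
    · simp [chunksB]
    · simp [chunksB, List.foldl]
    · simp [chunksB, List.foldl]
    · simp [chunksB, List.foldl]
    · simp [chunksB, List.foldl]
    · -- five steps of the loop: four pushes, then a space and counter reset
      have hrest : rest.length ≤ n := by
        simp at hl; omega
      rw [show (a :: b :: c :: d :: e :: rest) = [a, b, c, d, e] ++ rest from rfl,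
          List.foldl_append]
      simp only [List.foldl]
      norm_num
      rw [ih rest hrest]
      conv_rhs => rw [chunksB]
      simp

-- The loop of B flattens to chunksB of the suffix it still has to process.
theorem loopB_flatten (s : List Char) (n : Nat) : ∀ (i : Nat) (parts : List (List Char)),
    s.length - i ≤ n →
    (loopB s i parts).flatten = parts.flatten ++ chunksB (s.drop i) := by
  induction n with
  | zero =>
    intro i parts h
    rw [loopB]
    have hc : ¬ (s.length - i > 4) := by omega
    rw [if_neg hc, slice_from_nat]
    have hlen : (s.drop i).length ≤ 4 := by simp; omega
    rw [chunksB, if_pos hlen]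
    simp
  | succ n ih =>
    intro i parts h
    rw [loopB]
    by_cases hc : s.length - i > 4
    · rw [if_pos hc]
      rw [ih (i + 5) _ (by omega)]
      have hlen : ¬ ((s.drop i).length ≤ 4) := by simp; omega
      conv_rhs => rw [chunksB]
      rw [if_neg hlen, slice_block_nat]
      simp [List.drop_drop]
    · rw [if_neg hc, slice_from_nat]
      have hlen : (s.drop i).length ≤ 4 := by simp; omega
      rw [chunksB, if_pos hlen]
      simp

theorem format_key_eq (key : String) : format_key key = format_key_alt key := by
  have hA := loopA_eq_chunksB key.toList.length key.toList le_rfl ""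
  have hB := loopB_flatten key.toList key.toList.length 0 [] (by omega)
  simp only [format_key, format_key_alt]
  apply congrArg PySem.Str.strip
  apply String.toList_inj.mp
  rw [join_nil_flatten, hB]
  simpa using hA

-- ===== VERDICT (by name: the statement is the Claim_ definition above) =====
theorem format_key_spec : Claim_equal_format_key := by
  intro key _
  unfold Spec_format_key
  rw [format_key_eq key]
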